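-- pv_equiv track=rewrite | github.com/mgh3326/hackerrank_algorithm | challenges/electronics-shop/main.py | getMoneySpent
-- ===== SOURCE A (Python) =====
-- def getMoneySpent(keyboards, drives, budget):
--     max_purchase = -1
--     for keyboard in keyboards:
--         for drive in drives:
--             total = keyboard + drive
--             if budget >= total > max_purchase:
--                 max_purchase = total
--     return max_purchase
-- ===== SOURCE B (Python) =====
-- def getMoneySpent(keyboards, drives, budget):
--     ds = sorted(drives)
--     best = -1
--     for k in keyboards:
--         limit = budget - k
--         lo, hi = 0, len(ds)
--         while lo < hi:  # binary search: rightmost position with ds[pos-1] <= limit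
--             mid = (lo + hi) // 2
--             if ds[mid] <= limit:
--                 lo = mid + 1
--             else:
--                 hi = mid
--         if lo:
--             s = k + ds[lo - 1]
--             if s > best:
--                 best = s
--     return best
-- ===== Notes on version B (the rewrite author's own statement) =====
-- stated objective: faster
-- what changed: Replaces the nested loop over all keyboard/drive pairs with sorting the drives once and, per keyboard, a hand-written binary search for the most expensive drive that still fits the budget.
import Mathlib
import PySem

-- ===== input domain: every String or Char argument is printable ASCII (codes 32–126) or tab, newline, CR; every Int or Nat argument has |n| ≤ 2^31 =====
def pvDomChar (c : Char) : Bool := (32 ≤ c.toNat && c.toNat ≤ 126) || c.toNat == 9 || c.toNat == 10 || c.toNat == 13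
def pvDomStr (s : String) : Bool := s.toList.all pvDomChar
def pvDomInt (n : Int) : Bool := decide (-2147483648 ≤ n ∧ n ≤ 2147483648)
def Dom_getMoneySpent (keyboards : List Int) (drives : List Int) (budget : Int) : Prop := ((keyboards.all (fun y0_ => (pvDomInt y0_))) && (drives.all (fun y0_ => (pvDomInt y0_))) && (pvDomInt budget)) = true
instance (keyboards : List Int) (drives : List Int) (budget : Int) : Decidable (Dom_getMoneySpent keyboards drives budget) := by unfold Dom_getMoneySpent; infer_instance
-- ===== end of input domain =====

-- B sorts the drives once and binary-searches the best affordable drive per keyboard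
-- instead of A's scan over every keyboard/drive pair; return value proved equal.

-- ===== PORT A =====
def getMoneySpent (keyboards : List Int) (drives : List Int) (budget : Int) : Int :=
  keyboards.foldl (fun max_purchase keyboard =>
    drives.foldl (fun max_purchase drive =>
      let total := keyboard + drive
      if budget ≥ total ∧ total > max_purchase then total else max_purchase)
      max_purchase)
    (-1)

-- ===== PORT B =====
-- Source B's hand-written bisect-right loop ('while lo < hi: …'), transliterated;
-- ds[mid] is always in range here, so getD is exact.
def pvBisectGo (ds : List Int) (limit : Int) : Nat → Nat → Nat → Nat
  | 0, lo, _ => lo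
  | fuel + 1, lo, hi =>
    if lo < hi then
      let mid := (lo + hi) / 2
      if ds.getD mid 0 ≤ limit then pvBisectGo ds limit fuel (mid + 1) hi
      else pvBisectGo ds limit fuel lo mid
    else lo

def pvBisect (ds : List Int) (limit : Int) (lo hi : Nat) : Nat :=
  pvBisectGo ds limit (hi - lo) lo hi

def getMoneySpent_alt (keyboards : List Int) (drives : List Int) (budget : Int) : Int :=
  let ds := PySem.List.sorted drives (fun x => x) false
  keyboards.foldl (fun best k =>
    let limit := budget - k
    let lo := pvBisect ds limit 0 ds.length
    if lo ≠ 0 then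
      let s := k + ds.getD (lo - 1) 0
      if s > best then s else best
    else best)
    (-1)

-- ===== PRECONDITION & SPEC =====
def Spec_getMoneySpent (keyboards : List Int) (drives : List Int) (budget : Int) (out : Int) : Prop := out = getMoneySpent_alt keyboards drives budget
instance (keyboards : List Int) (drives : List Int) (budget : Int) (out : Int) : Decidable (Spec_getMoneySpent keyboards drives budget out) := by unfold Spec_getMoneySpent; infer_instance

-- ===== CLAIM (what is proved, stated in full; the proofs are below) =====
def Claim_equal_getMoneySpent : Prop := ∀ (keyboards : List Int) (drives : List Int) (budget : Int), Dom_getMoneySpent keyboards drives budget → Spec_getMoneySpent keyboards drives budget (getMoneySpent keyboards drives budget)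

-- ===== LEMMAS AND PROOFS =====

-- A's inner loop is a running max over the affordable sums.
lemma innerA_eq (b k : Int) (ds : List Int) : ∀ (mp : Int),
    ds.foldl (fun m d =>
      let total := k + d
      if b ≥ total ∧ total > m then total else m) mp
    = (ds.filter (fun d => decide (d ≤ b - k))).foldl (fun m d => max m (k + d)) mp := by
  induction ds with
  | nil => intro mp; rfl
  | cons d t ih =>
    intro mp
    by_cases hd : d ≤ b - k
    · simp only [List.foldl_cons, List.filter_cons, hd, decide_true, if_pos]
      rw [show (let total := k + d; if b ≥ total ∧ total > mp then total else mp) = max mp (k + d) by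
        simp only []; split_ifs <;> omega]
      exact ih (max mp (k + d))
    · simp only [List.foldl_cons, List.filter_cons, hd, decide_false, if_neg, Bool.false_eq_true,
        not_false_iff]
      rw [show (let total := k + d; if b ≥ total ∧ total > mp then total else mp) = mp by
        simp only []; split_ifs <;> omega]
      exact ih mp

-- Specification of the binary search on a sorted list: split point of [lo, hi).
lemma pvBisectGo_spec (ds : List Int) (limit : Int) (hs : ds.Pairwise (· ≤ ·)) :
    ∀ (fuel lo hi : Nat), hi - lo ≤ fuel → lo ≤ hi → hi ≤ ds.length →
    lo ≤ pvBisectGo ds limit fuel lo hi ∧ pvBisectGo ds limit fuel lo hi ≤ hi ∧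
    (∀ j (hj : j < ds.length), lo ≤ j → j < pvBisectGo ds limit fuel lo hi → ds[j] ≤ limit) ∧
    (∀ j (hj : j < ds.length), pvBisectGo ds limit fuel lo hi ≤ j → j < hi → limit < ds[j]) := by
  have hmono : ∀ p q (hp : p < ds.length) (hq : q < ds.length), p ≤ q → ds[p] ≤ ds[q] := by
    intro p q hp hq hpq
    rcases Nat.lt_or_ge p q with h | h
    · exact List.pairwise_iff_getElem.mp hs p q hp hq h
    · have : p = q := by omega
      subst this; exact le_refl _
  intro fuel
  induction fuel with
  | zero =>
    intro lo hi hfuel hlohi hhi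
    simp only [pvBisectGo]
    exact ⟨le_refl lo, by omega, by omega, by omega⟩
  | succ fuel ih =>
    intro lo hi hfuel hlohi hhi
    simp only [pvBisectGo]
    by_cases h : lo < hi
    · simp only [h, if_pos]
      have hmid : (lo + hi) / 2 < ds.length := by omega
      have hgetD : ds.getD ((lo + hi) / 2) 0 = ds[(lo + hi) / 2] := List.getD_eq_getElem ds 0 hmid
      by_cases hle : ds.getD ((lo + hi) / 2) 0 ≤ limit
      · simp only [hle, if_pos]
        obtain ⟨h1, h2, h3, h4⟩ := ih ((lo + hi) / 2 + 1) hi (by omega) (by omega) hhi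
        refine ⟨by omega, h2, ?_, h4⟩
        intro j hj hjlo hjlt
        by_cases hj2 : (lo + hi) / 2 + 1 ≤ j
        · exact h3 j hj hj2 hjlt
        · exact le_trans (hmono j ((lo + hi) / 2) hj hmid (by omega)) (hgetD ▸ hle)
      · simp only [hle, if_neg, not_false_iff]
        obtain ⟨h1, h2, h3, h4⟩ := ih lo ((lo + hi) / 2) (by omega) (by omega) (by omega)
        refine ⟨h1, by omega, h3, ?_⟩
        intro j hj hjge hjlt
        by_cases hj2 : j < (lo + hi) / 2
        · exact h4 j hj hjge hj2
        · have : limit < ds[(lo + hi) / 2] := by rw [← hgetD]; omega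
          exact lt_of_lt_of_le this (hmono ((lo + hi) / 2) j hmid hj (by omega))
    · simp only [h, if_neg, not_false_iff]
      exact ⟨le_refl lo, by omega, by omega, by omega⟩

lemma pvBisect_spec (ds : List Int) (limit : Int) (hs : ds.Pairwise (· ≤ ·))
    (lo hi : Nat) (hlohi : lo ≤ hi) (hhi : hi ≤ ds.length) :
    lo ≤ pvBisect ds limit lo hi ∧ pvBisect ds limit lo hi ≤ hi ∧
    (∀ j (hj : j < ds.length), lo ≤ j → j < pvBisect ds limit lo hi → ds[j] ≤ limit) ∧
    (∀ j (hj : j < ds.length), pvBisect ds limit lo hi ≤ j → j < hi → limit < ds[j]) :=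
  pvBisectGo_spec ds limit hs (hi - lo) lo hi (le_refl _) hlohi hhi

-- A filter whose truth values split at index i is a take.
lemma filter_eq_take (p : Int → Bool) (s : List Int) (i : Nat) (hi : i ≤ s.length)
    (h1 : ∀ j (hj : j < s.length), j < i → p s[j] = true)
    (h2 : ∀ j (hj : j < s.length), i ≤ j → p s[j] = false) :
    s.filter p = s.take i := by
  conv_lhs => rw [← List.take_append_drop i s]
  rw [List.filter_append]
  have ht : (s.take i).filter p = s.take i := by
    rw [List.filter_eq_self]
    intro a ha
    obtain ⟨j, hj, rfl⟩ := List.mem_take_iff_getElem.mp ha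
    exact h1 j (by omega) (by omega)
  have hd : (s.drop i).filter p = [] := by
    rw [List.filter_eq_nil_iff]
    intro a ha
    obtain ⟨j, hj, rfl⟩ := List.mem_drop_iff_getElem.mp ha
    simp [h2 (i + j) (by omega) (by omega)]
  rw [ht, hd, List.append_nil]

-- Running max over a nondecreasing list is its last element.
lemma foldl_max_last (k : Int) : ∀ (l : List Int), l.Pairwise (· ≤ ·) →
    ∀ (best : Int) (h : l ≠ []),
    l.foldl (fun m d => max m (k + d)) best = max best (k + l.getLast h) := by
  intro l
  induction l with
  | nil => intro _ _ h; exact absurd rfl h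
  | cons d t ih =>
    intro hp best h
    cases t with
    | nil => simp
    | cons d' t' =>
      rw [List.foldl_cons, ih hp.of_cons (max best (k + d)) (List.cons_ne_nil _ _)]
      have hd : d ≤ (d' :: t').getLast (List.cons_ne_nil _ _) :=
        (List.pairwise_cons.mp hp).1 _ (List.getLast_mem _)
      have hgl : (d :: d' :: t').getLast h = (d' :: t').getLast (List.cons_ne_nil _ _) := by
        simp [List.getLast_cons]
      rw [hgl]
      omega

-- ===== VERDICT (by name: the statement is the Claim_ definition above) =====
theorem getMoneySpent_spec : Claim_equal_getMoneySpent := by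
  intro ks ds b _
  unfold Spec_getMoneySpent
  simp only [getMoneySpent, getMoneySpent_alt]
  set s := PySem.List.sorted ds (fun x => x) false with hs_def
  have hs_perm : s.Perm ds := PySem.List.sorted_perm ds (fun x => x) false
  have hs_sorted : s.Pairwise (· ≤ ·) := PySem.List.sorted_pairwise ds (fun x => x)
  have hstep : ∀ (mp k : Int),
      ds.foldl (fun m d =>
        let total := k + d
        if b ≥ total ∧ total > m then total else m) mp
      = (if pvBisect s (b - k) 0 s.length ≠ 0 then
           (if k + s.getD (pvBisect s (b - k) 0 s.length - 1) 0 > mp then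
              k + s.getD (pvBisect s (b - k) 0 s.length - 1) 0
            else mp)
         else mp) := by
    intro mp k
    rw [innerA_eq]
    have hperm : (ds.filter (fun d => decide (d ≤ b - k))).Perm
        (s.filter (fun d => decide (d ≤ b - k))) :=
      List.Perm.filter _ hs_perm.symm
    rw [@List.Perm.foldl_eq _ _ (fun m d => max m (k + d)) _ _
      ⟨fun m a c => by omega⟩ hperm mp]
    obtain ⟨h1, h2, h3, h4⟩ :=
      pvBisect_spec s (b - k) hs_sorted 0 s.length (Nat.zero_le _) (le_refl _)
    set i := pvBisect s (b - k) 0 s.length with hi_def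
    have hfil : s.filter (fun d => decide (d ≤ b - k)) = s.take i := by
      apply filter_eq_take _ _ _ h2
      · intro j hj hji; simp [h3 j hj (Nat.zero_le _) hji]
      · intro j hj hji; simp [h4 j hj hji hj]
    rw [hfil]
    by_cases hi0 : i = 0
    · rw [hi0]; simp
    · have hile : i ≤ s.length := h2
      have hlen : (s.take i).length = i := by rw [List.length_take]; omega
      have hne : s.take i ≠ [] := by
        intro hnil; rw [hnil] at hlen; simp at hlen; omega
      rw [foldl_max_last k (s.take i) (hs_sorted.sublist (List.take_sublist i s)) mp hne]
      have hlast : (s.take i).getLast hne = s[i - 1]'(by omega) := by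
        rw [List.getLast_eq_getElem, List.getElem_take]
        simp only [hlen]
      have hgetD : s.getD (i - 1) 0 = s[i - 1]'(by omega) :=
        List.getD_eq_getElem s 0 (by omega)
      rw [hlast, if_pos hi0, hgetD]
      split_ifs <;> omega
  calc ks.foldl (fun mp k => ds.foldl (fun m d =>
        let total := k + d
        if b ≥ total ∧ total > m then total else m) mp) (-1)
      = ks.foldl (fun mp k =>
          if pvBisect s (b - k) 0 s.length ≠ 0 then
            (if k + s.getD (pvBisect s (b - k) 0 s.length - 1) 0 > mp then
               k + s.getD (pvBisect s (b - k) 0 s.length - 1) 0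
             else mp)
          else mp) (-1) := by
        apply PySem.List.foldl_congr_mem
        intro acc x _; exact hstep acc x
    _ = _ := rfl
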